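-- pv_equiv track=rewrite | github.com/rvorine/reverse-word-preserve-space | python/reverse_words.py | reverse_words_preserve_spaces
-- ===== SOURCE A (Python) =====
-- def reverse_words_preserve_spaces(s):
--     """
--     Reverse words in a string while preserving the positions of spaces.
--
--     Example:
--         Input:  "Hello   World"
--         Output: "World   Hello"
--     """
--     # Extract only the words (non-space tokens)
--     words = s.split()
--     words.reverse()
--
--     result = []
--     word_index = 0
--
--     i = 0
--     while i < len(s):
--         if s[i] == ' ':
--             result.append(' ')
--             i += 1
--         else:
--             # Find end of current word in original string
--             j = i
--             while j < len(s) and s[j] != ' ':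
--                 j += 1
--             result.append(words[word_index])
--             word_index += 1
--             i = j
--
--     return ''.join(result)
-- ===== SOURCE B (Python) =====
-- def reverse_words_preserve_spaces(s):
--     """Reverse words while preserving space positions: rebuild via split-on-space."""
--     words = s.split()
--     words.reverse()
--     it = iter(words)
--     return ' '.join(next(it) if p else '' for p in s.split(' '))
-- ===== Notes on version B (the rewrite author's own statement) =====
-- stated objective: simpler
-- what changed: B replaces A's index-driven character scan (outer while over positions with an inner end-of-word while and a word counter) by splitting on the literal space character and rejoining with spaces, substituting each non-empty part with the next reversed word; the C-implemented split/join also makes it measurably faster.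
import Mathlib
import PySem

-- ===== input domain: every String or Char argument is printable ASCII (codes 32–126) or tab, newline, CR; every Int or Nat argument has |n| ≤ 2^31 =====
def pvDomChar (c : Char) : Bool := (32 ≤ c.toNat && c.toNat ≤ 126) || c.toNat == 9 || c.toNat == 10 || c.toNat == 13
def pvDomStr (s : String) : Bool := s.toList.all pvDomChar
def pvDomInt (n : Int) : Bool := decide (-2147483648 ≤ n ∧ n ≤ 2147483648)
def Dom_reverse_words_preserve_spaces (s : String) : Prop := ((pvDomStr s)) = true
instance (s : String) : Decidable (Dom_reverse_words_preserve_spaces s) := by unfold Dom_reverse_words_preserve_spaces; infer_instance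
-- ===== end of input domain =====

-- B rebuilds the string from s.split(' ') parts (replacing each non-empty part with the
-- next reversed word) instead of A's index-driven character scan: simpler decomposition.


-- ===== PORT A =====
-- A's main while-loop over character index i: a space char is emitted as is; otherwise the inner
-- while (find end of word) is the dropWhile, and words[word_index] is appended.
-- The .getD [] arm is unreachable inside Pre_ (there Python's words[word_index] is in range).
def pvLoopA (words : List (List Char)) : List Char → Nat → List (List Char)
  | [], _ => []
  | c :: rest, wi =>
    if c = ' ' then
      [' '] :: pvLoopA words rest wi
    else
      ((PySem.List.pyGet? words (wi : Int)).getD []) ::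
        pvLoopA words ((c :: rest).dropWhile (· ≠ ' ')) (wi + 1)
  termination_by cs _ => cs.length
  decreasing_by
  · simp
  · rename_i hc
    simp [hc]
    exact List.length_dropWhile_le _ _

def reverse_words_preserve_spaces (s : String) : String :=
  let words := (PySem.Chars.split₀ s.toList).reverse
  String.mk (PySem.Chars.join [] (pvLoopA words s.toList 0))

-- ===== PORT B =====
-- B's generator ' '.join(next(it) if p else '' for p in s.split(' ')): the iterator over
-- the reversed words is the list consumed head-first (headD [] unreachable inside Pre_).
def pvReplaceB : List (List Char) → List (List Char) → List (List Char)
  | [], _ => []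
  | p :: ps, ws =>
    if p.isEmpty then [] :: pvReplaceB ps ws
    else ws.headD [] :: pvReplaceB ps ws.tail

def reverse_words_preserve_spaces_alt (s : String) : String :=
  let words := (PySem.Chars.split₀ s.toList).reverse
  String.mk (PySem.Chars.join [' '] (pvReplaceB (PySem.Chars.splitOn s.toList [' ']) words))

-- ===== PRECONDITION & SPEC =====
-- Pre_ excludes exactly the inputs on which Python A raises IndexError: strings in which
-- the number of maximal runs of non-space characters (runs may consist only of other
-- whitespace, e.g. of tabs, and then contribute no word) exceeds the number of s.split()
-- words.  B raises on exactly the same inputs (RuntimeError from the exhausted iterator).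
def Pre_reverse_words_preserve_spaces (s : String) : Prop :=
  (PySem.Chars.splitOn s.toList [' ']).countP (fun p => !p.isEmpty) ≤
    (PySem.Chars.split₀ s.toList).length
instance (s : String) : Decidable (Pre_reverse_words_preserve_spaces s) := by
  unfold Pre_reverse_words_preserve_spaces; infer_instance

def pvWitness_reverse_words_preserve_spaces : String := "Hello   World"

def Spec_reverse_words_preserve_spaces (s : String) (out : String) : Prop :=
  out = reverse_words_preserve_spaces_alt s
instance (s : String) (out : String) : Decidable (Spec_reverse_words_preserve_spaces s out) := by
  unfold Spec_reverse_words_preserve_spaces; infer_instance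

-- ===== CLAIM (what is proved, stated in full; the proofs are below) =====
def Claim_equal_reverse_words_preserve_spaces : Prop :=
  ∀ (s : String), Dom_reverse_words_preserve_spaces s →
    Pre_reverse_words_preserve_spaces s →
      Spec_reverse_words_preserve_spaces s (reverse_words_preserve_spaces s)

-- ===== LEMMAS AND PROOFS =====

-- A simple structural description of s.split(' ') on the character list.
def pvSplit : List Char → List (List Char)
  | [] => [[]]
  | c :: rest => if c = ' ' then [] :: pvSplit rest else (pvSplit rest).modifyHead (c :: ·)

theorem pvSplit_ne_nil : ∀ cs : List Char, pvSplit cs ≠ []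
  | [] => by simp [pvSplit]
  | c :: rest => by
    by_cases h : c = ' '
    · simp [pvSplit, h]
    · simp only [pvSplit, if_neg h]
      cases hps : pvSplit rest with
      | nil => exact absurd hps (pvSplit_ne_nil rest)
      | cons q qs => simp

theorem pvReplaceB_ne_nil (ps : List (List Char)) (ws : List (List Char)) (h : ps ≠ []) :
    pvReplaceB ps ws ≠ [] := by
  cases ps with
  | nil => exact absurd rfl h
  | cons p ps => by_cases hp : p.isEmpty <;> simp [pvReplaceB, hp]

-- splitOn.go with separator [' '] accumulates pvSplit.
theorem pvGo_eq (fuel : Nat) : ∀ (l cur : List Char) (acc : List (List Char)),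
    l.length ≤ fuel →
    PySem.Chars.splitOn.go [' '] fuel l cur acc =
      acc.reverse ++ (pvSplit l).modifyHead (cur.reverse ++ ·) := by
  induction fuel with
  | zero =>
    intro l cur acc h
    have : l = [] := List.length_eq_zero_iff.mp (Nat.le_zero.mp h)
    subst this
    simp [PySem.Chars.splitOn.go, pvSplit]
  | succ n ih =>
    intro l cur acc h
    cases l with
    | nil => simp [PySem.Chars.splitOn.go, pvSplit]
    | cons c rest =>
      by_cases hc : c = ' '
      · subst hc
        have : ([' '].isPrefixOf (' ' :: rest)) = true := by simp [List.isPrefixOf]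
        simp only [PySem.Chars.splitOn.go, this, if_pos]
        rw [show List.drop [' '].length (' ' :: rest) = rest by simp]
        rw [ih rest [] (cur.reverse :: acc) (by simpa using Nat.le_of_succ_le_succ h)]
        cases hps : pvSplit rest <;> simp [pvSplit, List.modifyHead, hps]
      · have hpre : ([' '].isPrefixOf (c :: rest)) = false := by
          simp [List.isPrefixOf]
          exact fun e => hc e.symm
        simp only [PySem.Chars.splitOn.go]
        rw [if_neg (by simp [hpre])]
        rw [ih rest (c :: cur) acc (by simpa using Nat.le_of_succ_le_succ h)]
        have hne := pvSplit_ne_nil rest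
        cases hps : pvSplit rest with
        | nil => exact absurd hps hne
        | cons q qs => simp [pvSplit, hc, hps, List.modifyHead]

theorem pvSplitOn_space (cs : List Char) :
    PySem.Chars.splitOn cs [' '] = pvSplit cs := by
  unfold PySem.Chars.splitOn
  rw [pvGo_eq (cs.length + 1) cs [] [] (Nat.le_succ _)]
  cases h : pvSplit cs with
  | nil => exact absurd h (pvSplit_ne_nil cs)
  | cons q qs => simp [List.modifyHead]

-- pvSplit of a string = the first non-space run, then the split of what follows the space.
def pvAfter : List Char → List (List Char)
  | [] => []
  | _ :: r => pvSplit r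

theorem pvSplit_run (cs : List Char) :
    pvSplit cs = cs.takeWhile (· ≠ ' ') :: pvAfter (cs.dropWhile (· ≠ ' ')) := by
  induction cs with
  | nil => simp [pvSplit, pvAfter]
  | cons c rest ih =>
    by_cases hc : c = ' '
    · subst hc; simp [pvSplit, pvAfter]
    · simp [pvSplit, hc, ih, List.modifyHead]

theorem pvJoin_nil_cons (x : List Char) (xs : List (List Char)) :
    PySem.Chars.join [] (x :: xs) = x ++ PySem.Chars.join [] xs := by
  cases xs with
  | nil => simp [PySem.Chars.join, List.intercalate]
  | cons y ys => simp [PySem.Chars.join, List.intercalate, List.intersperse]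

theorem pvJoin_sep_cons (sep x : List Char) (y : List Char) (xs : List (List Char)) :
    PySem.Chars.join sep (x :: y :: xs) = x ++ sep ++ PySem.Chars.join sep (y :: xs) := by
  simp [PySem.Chars.join, List.intercalate, List.intersperse]

theorem pvJoin_singleton (sep x : List Char) :
    PySem.Chars.join sep [x] = x := by
  simp [PySem.Chars.join, List.intercalate]

-- head of dropWhile (· ≠ ' ') is ' '
theorem pvDropWhile_head : ∀ (cs : List Char) {d : Char} {r : List Char},
    (h : cs.dropWhile (· ≠ ' ') = d :: r) → d = ' '
  | [], _, _, h => by simp at h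
  | c :: rest, d, r, h => by
    by_cases hc : c = ' '
    · subst hc
      simp at h
      exact h.1.symm
    · rw [List.dropWhile_cons_of_pos (by simpa using hc)] at h
      exact pvDropWhile_head rest h

-- MAIN: A's scan and B's part-replacement produce the same joined string.
theorem pvMain (n : Nat) : ∀ (cs : List Char) (ws : List (List Char)) (wi : Nat),
    cs.length ≤ n →
    PySem.Chars.join [] (pvLoopA ws cs wi) =
      PySem.Chars.join [' '] (pvReplaceB (pvSplit cs) (ws.drop wi)) := by
  induction n with
  | zero =>
    intro cs ws wi h
    have : cs = [] := List.length_eq_zero_iff.mp (Nat.le_zero.mp h)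
    subst this
    simp [pvLoopA, pvSplit, pvReplaceB, PySem.Chars.join, List.intercalate]
  | succ n ih =>
    intro cs ws wi h
    cases cs with
    | nil => simp [pvLoopA, pvSplit, pvReplaceB, PySem.Chars.join, List.intercalate]
    | cons c rest =>
      by_cases hc : c = ' '
      · subst hc
        rw [show pvLoopA ws (' ' :: rest) wi = [' '] :: pvLoopA ws rest wi by
              simp [pvLoopA]]
        rw [pvJoin_nil_cons]
        rw [show pvSplit (' ' :: rest) = [] :: pvSplit rest by simp [pvSplit]]
        rw [show pvReplaceB ([] :: pvSplit rest) (ws.drop wi)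
              = [] :: pvReplaceB (pvSplit rest) (ws.drop wi) by simp [pvReplaceB]]
        cases hps : pvSplit rest with
        | nil => exact absurd hps (pvSplit_ne_nil rest)
        | cons q qs =>
          have hrep := pvReplaceB_ne_nil (q :: qs) (ws.drop wi) (by simp)
          cases hr : pvReplaceB (q :: qs) (ws.drop wi) with
          | nil => exact absurd hr hrep
          | cons z zs =>
            rw [pvJoin_sep_cons]
            rw [← hr, ← hps, ih rest ws wi (by simpa using Nat.le_of_succ_le_succ h)]
            simp
      · -- word case
        have hw : (PySem.List.pyGet? ws (wi : Int)).getD [] = (ws.drop wi).headD [] := by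
          rw [PySem.List.pyGet?_natCast, ← List.head?_drop, List.headD_eq_head?_getD]
        rw [show pvLoopA ws (c :: rest) wi
              = ((PySem.List.pyGet? ws (wi : Int)).getD []) ::
                  pvLoopA ws ((c :: rest).dropWhile (· ≠ ' ')) (wi + 1) by
              rw [pvLoopA]; simp [hc]]
        rw [pvSplit_run (c :: rest)]
        have htw : (c :: rest).takeWhile (· ≠ ' ') = c :: rest.takeWhile (· ≠ ' ') := by
          simp [hc]
        have hdw : (c :: rest).dropWhile (· ≠ ' ') = rest.dropWhile (· ≠ ' ') := by
          simp [hc]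
        rw [show pvReplaceB ((c :: rest).takeWhile (· ≠ ' ') :: pvAfter ((c :: rest).dropWhile (· ≠ ' '))) (ws.drop wi)
              = (ws.drop wi).headD [] ::
                  pvReplaceB (pvAfter ((c :: rest).dropWhile (· ≠ ' '))) (ws.drop wi).tail by
              rw [htw]; simp [pvReplaceB]]
        rw [List.tail_drop, hw, hdw]
        cases hd : rest.dropWhile (· ≠ ' ') with
        | nil =>
          simp only [pvAfter, pvLoopA, pvReplaceB]
          rw [pvJoin_singleton, pvJoin_singleton]
        | cons d r =>
          have hds : d = ' ' := pvDropWhile_head (cs := rest) hd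
          subst hds
          simp only [pvAfter]
          rw [show pvLoopA ws (' ' :: r) (wi + 1) = [' '] :: pvLoopA ws r (wi + 1) by
                simp [pvLoopA]]
          rw [pvJoin_nil_cons, pvJoin_nil_cons]
          have hlen : r.length ≤ n := by
            have h1 : (rest.dropWhile (· ≠ ' ')).length ≤ rest.length :=
              List.length_dropWhile_le _ _
            rw [hd] at h1
            have h2 : rest.length + 1 ≤ n + 1 := by simpa using h
            simp at h1
            omega
          cases hps : pvSplit r with
          | nil => exact absurd hps (pvSplit_ne_nil r)
          | cons q qs =>
            have hrep := pvReplaceB_ne_nil (q :: qs) (ws.drop (wi + 1)) (by simp)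
            cases hr : pvReplaceB (q :: qs) (ws.drop (wi + 1)) with
            | nil => exact absurd hr hrep
            | cons z zs =>
              rw [pvJoin_sep_cons]
              rw [← hr, ← hps, ih r ws (wi + 1) hlen]
              simp

-- ===== VERDICT (by name: the statement is the Claim_ definition above) =====
theorem reverse_words_preserve_spaces_spec : Claim_equal_reverse_words_preserve_spaces := by
  intro s _ _
  unfold Spec_reverse_words_preserve_spaces
  unfold reverse_words_preserve_spaces reverse_words_preserve_spaces_alt
  simp only [pvSplitOn_space]
  have := pvMain s.toList.length s.toList ((PySem.Chars.split₀ s.toList).reverse) 0 le_rfl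
  rw [List.drop_zero] at this
  rw [this]
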